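-- pv_equiv track=rewrite | github.com/AntonioABLima/Advent-of-Code-2024 | Day 9 Disk Fragmenter/Part2.py | findFreeSpace
-- ===== SOURCE A (Python) =====
-- def findFreeSpace(blocks, file_length):
--     free_start = -1
--     free_length = 0
--
--     for i, block in enumerate(blocks):
--         if block == '.':
--             if free_start == -1:
--                 free_start = i
--             free_length += 1
--
--             if free_length == file_length:
--                 return free_start
--         else:
--             free_start = -1
--             free_length = 0
--
--     return None
-- ===== SOURCE B (Python) =====
-- def findFreeSpace(blocks, file_length):
--     if file_length < 1:
--         return None
--     # build the maximal runs of '.' as (start, length), then pick the first fit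
--     runs = []
--     i = 0
--     n = len(blocks)
--     while i < n:
--         if blocks[i] == '.':
--             j = i
--             while j < n and blocks[j] == '.':
--                 j += 1
--             runs.append((i, j - i))
--             i = j
--         else:
--             i += 1
--     for start, length in runs:
--         if length >= file_length:
--             return start
--     return None
-- ===== Notes on version B (the rewrite author's own statement) =====
-- stated objective: alternative
-- what changed: Replaces the stateful accumulate-and-reset scan (free_start/free_length) by a build-runs-then-filter decomposition: first collect the maximal '.'-runs as (start,length) pairs, then return the start of the first run with length >= file_length (none when file_length < 1).
import Mathlib
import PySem

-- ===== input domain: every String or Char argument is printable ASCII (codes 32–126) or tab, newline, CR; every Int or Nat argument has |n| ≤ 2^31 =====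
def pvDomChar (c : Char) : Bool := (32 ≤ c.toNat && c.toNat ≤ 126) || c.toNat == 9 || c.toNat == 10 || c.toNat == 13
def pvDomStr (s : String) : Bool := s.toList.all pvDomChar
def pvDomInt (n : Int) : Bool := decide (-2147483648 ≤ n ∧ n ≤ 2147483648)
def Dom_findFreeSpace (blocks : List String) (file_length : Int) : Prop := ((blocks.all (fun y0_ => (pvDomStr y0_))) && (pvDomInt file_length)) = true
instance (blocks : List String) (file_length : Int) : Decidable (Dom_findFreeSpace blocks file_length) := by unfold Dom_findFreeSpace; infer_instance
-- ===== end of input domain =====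

-- B replaces A's stateful accumulate-and-reset scan by building the maximal '.'-runs
-- first and then filtering for the first fit (alternative decomposition, same cost).


-- ===== PORT A =====
-- A's for-loop over enumerate(blocks) with state (free_start, free_length).
def findFreeSpaceGo (file_length : Int) : List String → Int → Int → Int → Option Int
  | [], _, _, _ => none
  | b :: rest, i, free_start, free_length =>
    if b = "." then
      let fs := if free_start = -1 then i else free_start
      let fl := free_length + 1
      if fl = file_length then some fs
      else findFreeSpaceGo file_length rest (i + 1) fs fl
    else findFreeSpaceGo file_length rest (i + 1) (-1) 0

def findFreeSpace (blocks : List String) (file_length : Int) : Option Int :=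
  findFreeSpaceGo file_length blocks 0 (-1) 0

-- ===== PORT B =====
-- length of the leading run of '.' (B's inner while loop)
def countDots : List String → Nat
  | [] => 0
  | b :: rest => if b = "." then countDots rest + 1 else 0

theorem countDots_le : ∀ (bs : List String), countDots bs ≤ bs.length
  | [] => by simp [countDots]
  | b :: rest => by
    simp only [countDots]
    split
    · exact Nat.succ_le_succ (countDots_le rest)
    · exact Nat.zero_le _

-- B's outer while loop: collect maximal runs as (start, length)
def dotRuns : List String → Int → List (Int × Int)
  | [], _ => []
  | b :: rest, i =>
    if b = "." then
      let k := countDots (b :: rest)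
      (i, (k : Int)) :: dotRuns (List.drop k (b :: rest)) (i + k)
    else dotRuns rest (i + 1)
termination_by bs => bs.length
decreasing_by
  · simp only [List.length_drop]
    have hk : 1 ≤ countDots (b :: rest) := by simp [countDots, *]
    have := countDots_le (b :: rest)
    simp only [List.length_cons] at *
    omega
  · simp

-- B's final for-loop: first run long enough
def firstFit (file_length : Int) : List (Int × Int) → Option Int
  | [] => none
  | (s, l) :: rest => if l ≥ file_length then some s else firstFit file_length rest

def findFreeSpace_alt (blocks : List String) (file_length : Int) : Option Int :=
  if file_length < 1 then none
  else firstFit file_length (dotRuns blocks 0)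

-- ===== PRECONDITION & SPEC =====
def Spec_findFreeSpace (blocks : List String) (file_length : Int) (out : Option Int) : Prop := out = findFreeSpace_alt blocks file_length
instance (blocks : List String) (file_length : Int) (out : Option Int) : Decidable (Spec_findFreeSpace blocks file_length out) := by unfold Spec_findFreeSpace; infer_instance

-- ===== CLAIM (what is proved, stated in full; the proofs are below) =====
def Claim_equal_findFreeSpace : Prop := ∀ (blocks : List String) (file_length : Int), Dom_findFreeSpace blocks file_length → Spec_findFreeSpace blocks file_length (findFreeSpace blocks file_length)

-- ===== LEMMAS AND PROOFS =====

-- A never returns when file_length ≤ 0: the counter only takes values ≥ 1.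
theorem goA_nonpos (file_length : Int) (h : file_length ≤ 0) :
    ∀ (bs : List String) (i fs c : Int), 0 ≤ c →
      findFreeSpaceGo file_length bs i fs c = none := by
  intro bs
  induction bs with
  | nil => intro i fs c _; simp [findFreeSpaceGo]
  | cons b rest ih =>
    intro i fs c hc
    simp only [findFreeSpaceGo]
    split
    · have : ¬ (c + 1 = file_length) := by omega
      simp only [this, if_false]
      exact ih _ _ _ (by omega)
    · exact ih _ _ _ (by omega)

-- Scanning the leading dots mid-run: state (start, c) with c < file_length.
theorem goA_mid (file_length : Int) (hfl : 1 ≤ file_length) :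
    ∀ (bs : List String) (i start c : Int), c < file_length → start ≠ -1 →
      findFreeSpaceGo file_length bs i start c =
        if file_length ≤ c + (countDots bs : Int) then some start
        else findFreeSpaceGo file_length (bs.drop (countDots bs)) (i + (countDots bs : Int)) (-1) 0 := by
  intro bs
  induction bs with
  | nil =>
    intro i start c hc _
    simp [findFreeSpaceGo, countDots]
    omega
  | cons b rest ih =>
    intro i start c hc hstart
    by_cases hb : b = "."
    · subst hb
      have hk : countDots (("." : String) :: rest) = countDots rest + 1 := by simp [countDots]
      rw [hk]
      have e1 : findFreeSpaceGo file_length (("." : String) :: rest) i start c =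
          (if c + 1 = file_length then some start
           else findFreeSpaceGo file_length rest (i + 1) start (c + 1)) := by
        simp [findFreeSpaceGo, hstart]
      rw [e1]
      by_cases hret : c + 1 = file_length
      · rw [if_pos hret, if_pos (show file_length ≤ c + ((countDots rest + 1 : Nat) : Int) by push_cast; omega)]
      · rw [if_neg hret, ih (i + 1) start (c + 1) (by omega) hstart]
        by_cases hge : file_length ≤ c + ((countDots rest + 1 : Nat) : Int)
        · rw [if_pos (by push_cast at hge ⊢; omega : file_length ≤ c + 1 + ((countDots rest : Nat) : Int)), if_pos hge]
        · rw [if_neg (by push_cast at hge ⊢; omega : ¬ file_length ≤ c + 1 + ((countDots rest : Nat) : Int)), if_neg hge]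
          have hdrop : List.drop (countDots rest + 1) (("." : String) :: rest) = List.drop (countDots rest) rest := by simp
          have hidx : i + 1 + ((countDots rest : Nat) : Int) = i + ((countDots rest + 1 : Nat) : Int) := by push_cast; ring
          rw [hdrop, hidx]
    · have hk : countDots (b :: rest) = 0 := by simp [countDots, hb]
      rw [hk]
      rw [if_neg (by push_cast; omega : ¬ file_length ≤ c + ((0 : Nat) : Int))]
      simp only [List.drop_zero, Nat.cast_zero, add_zero]
      conv_lhs => rw [findFreeSpaceGo]
      rw [if_neg hb]
      conv_rhs => rw [findFreeSpaceGo]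
      rw [if_neg hb]

-- Main correspondence for file_length ≥ 1.
theorem goA_runs (file_length : Int) (hfl : 1 ≤ file_length) :
    ∀ (n : Nat) (bs : List String) (i : Int), bs.length ≤ n → 0 ≤ i →
      findFreeSpaceGo file_length bs i (-1) 0 = firstFit file_length (dotRuns bs i) := by
  intro n
  induction n with
  | zero =>
    intro bs i hlen _
    have : bs = [] := List.length_eq_zero_iff.mp (Nat.le_zero.mp hlen)
    subst this
    simp [findFreeSpaceGo, dotRuns, firstFit]
  | succ m ih =>
    intro bs i hlen hi
    match bs with
    | [] => simp [findFreeSpaceGo, dotRuns, firstFit]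
    | b :: rest =>
      have hrest : rest.length ≤ m := by
        simpa using Nat.lt_succ_iff.mp (by simpa using hlen)
      by_cases hb : b = "."
      · subst hb
        have hk : countDots (("." : String) :: rest) = countDots rest + 1 := by simp [countDots]
        rw [dotRuns, if_pos rfl]
        simp only [hk, firstFit]
        have e1 : findFreeSpaceGo file_length (("." : String) :: rest) i (-1) 0 =
            (if (0 : Int) + 1 = file_length then some i
             else findFreeSpaceGo file_length rest (i + 1) i (0 + 1)) := by
          simp [findFreeSpaceGo]
        rw [e1]
        by_cases hret : (0 : Int) + 1 = file_length
        · rw [if_pos hret, if_pos (show ((countDots rest + 1 : Nat) : Int) ≥ file_length by push_cast; omega)]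
        · rw [if_neg hret, goA_mid file_length hfl rest (i + 1) i (0 + 1) (by omega) (by omega)]
          by_cases hge : ((countDots rest + 1 : Nat) : Int) ≥ file_length
          · rw [if_pos (by push_cast at hge ⊢; omega : file_length ≤ 0 + 1 + ((countDots rest : Nat) : Int)), if_pos hge]
          · rw [if_neg (by push_cast at hge ⊢; omega : ¬ file_length ≤ 0 + 1 + ((countDots rest : Nat) : Int)), if_neg hge]
            have hdrop : List.drop (countDots rest + 1) (("." : String) :: rest) = List.drop (countDots rest) rest := by simp
            have hidx : i + 1 + ((countDots rest : Nat) : Int) = i + ((countDots rest + 1 : Nat) : Int) := by push_cast; ring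
            rw [hdrop, hidx]
            exact ih _ _ (by simp only [List.length_drop]; omega) (by push_cast; omega)
      · have hrun : dotRuns (b :: rest) i = dotRuns rest (i + 1) := by rw [dotRuns]; simp [hb]
        rw [hrun]
        conv_lhs => rw [findFreeSpaceGo]
        rw [if_neg hb]
        exact ih rest (i + 1) hrest (by omega)

-- ===== VERDICT (by name: the statement is the Claim_ definition above) =====
theorem findFreeSpace_spec : Claim_equal_findFreeSpace := by
  intro blocks file_length _
  unfold Spec_findFreeSpace findFreeSpace findFreeSpace_alt
  by_cases h : file_length < 1
  · rw [if_pos h]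
    exact goA_nonpos file_length (by omega) blocks 0 (-1) 0 (by omega)
  · rw [if_neg h]
    exact goA_runs file_length (by omega) blocks.length blocks 0 (le_refl _) (by omega)
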